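-- pv_equiv track=rewrite | github.com/wwang2/no-three-in-line-vivid-salmon | orbits/01-algebraic-sa/solution.py | _all_lines
-- ===== SOURCE A (Python) =====
-- from math import gcd
--
-- def _all_lines(n: int):
--     """Return all maximal collinear subsets of {0,...,n-1}^2 with >=2 points.
--
--     Each line is represented by its canonical form (dx, dy, c1, c2) where
--     (dx, dy) is the reduced direction and (c1, c2) parameterize the line.
--     We enumerate by direction: for each gcd-reduced (dx, dy) with dx>0 or
--     (dx==0 and dy>0), iterate over bases.
--     """
--     directions = set()
--     for dx in range(-(n - 1), n):
--         for dy in range(-(n - 1), n):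
--             if dx == 0 and dy == 0:
--                 continue
--             g = gcd(abs(dx), abs(dy))
--             rdx, rdy = dx // g, dy // g
--             # canonicalize sign so (rdx>0) or (rdx==0 and rdy>0)
--             if rdx < 0 or (rdx == 0 and rdy < 0):
--                 rdx, rdy = -rdx, -rdy
--             directions.add((rdx, rdy))
--
--     lines = set()
--     for rdx, rdy in directions:
--         for x0 in range(n):
--             for y0 in range(n):
--                 pts = []
--                 x, y = x0, y0
--                 while 0 <= x < n and 0 <= y < n:
--                     pts.append((x, y))
--                     x += rdx
--                     y += rdy
--                 # extend backwards
--                 x, y = x0 - rdx, y0 - rdy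
--                 back = []
--                 while 0 <= x < n and 0 <= y < n:
--                     back.append((x, y))
--                     x -= rdx
--                     y -= rdy
--                 full = tuple(sorted(back[::-1] + pts))
--                 if len(full) >= 3:
--                     lines.add(full)
--     return sorted(lines)
-- ===== SOURCE B (Python) =====
-- from math import gcd
--
-- def _all_lines(n: int):
--     """Return all maximal collinear subsets of {0,...,n-1}^2 with >=3 points.
--
--     Enumerate each canonical reduced direction directly, and trace each line
--     exactly once, starting only from its unique base point whose in-grid
--     predecessor does not exist.  The forward trace is already sorted (the
--     direction is canonical), and distinct (direction, base) pairs give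
--     distinct lines, so no set and no per-line sort are needed.
--     """
--     lines = []
--     for rdx in range(n):
--         for rdy in range(-(n - 1), n):
--             if rdx == 0 and rdy <= 0:
--                 continue
--             if gcd(rdx, abs(rdy)) != 1:
--                 continue
--             for x0 in range(n):
--                 for y0 in range(n):
--                     px, py = x0 - rdx, y0 - rdy
--                     if 0 <= px < n and 0 <= py < n:
--                         continue  # not a base point: line starts earlier
--                     pts = []
--                     x, y = x0, y0
--                     while 0 <= x < n and 0 <= y < n:
--                         pts.append((x, y))
--                         x += rdx
--                         y += rdy
--                     if len(pts) >= 3: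
--                         lines.append(tuple(pts))
--     return sorted(lines)
-- ===== Notes on version B (the rewrite author's own statement) =====
-- stated objective: alternative
-- what changed: Instead of building the direction set by gcd-reducing all O(n^2) pairs and re-tracing (forwards and backwards) and re-sorting the full line from every one of the n^2 base points, B enumerates each canonical coprime direction directly and traces every line exactly once, starting only from its unique base point whose predecessor lies outside the grid; the forward trace is already sorted and distinct bases give distinct lines, so the per-line sort and the deduplicating set disappear (intended as asymptotically faster, O(n^4) vs O(n^5); …
import Mathlib
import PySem

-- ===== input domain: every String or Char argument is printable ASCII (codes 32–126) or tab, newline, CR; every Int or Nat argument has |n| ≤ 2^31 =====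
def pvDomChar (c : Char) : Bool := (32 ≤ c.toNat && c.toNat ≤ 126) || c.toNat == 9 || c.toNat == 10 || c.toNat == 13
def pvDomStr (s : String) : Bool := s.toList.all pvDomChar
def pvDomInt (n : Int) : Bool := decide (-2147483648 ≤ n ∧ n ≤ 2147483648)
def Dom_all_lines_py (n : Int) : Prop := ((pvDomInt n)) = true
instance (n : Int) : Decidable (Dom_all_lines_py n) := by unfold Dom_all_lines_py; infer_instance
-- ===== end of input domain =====

-- B replaces A's trace-from-every-base-and-resort strategy by tracing each line once
-- from its unique boundary base point (no set, no per-line sort); equivalence is proved for every n.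

-- ===== PORT A =====
-- Python compares tuples and tuples-of-tuples lexicographically: sort keys into Lex types.
def pvKp (p : Int × Int) : Lex (Int × Int) := toLex p
def pvKl (l : List (Int × Int)) : List (Lex (Int × Int)) := l.map pvKp

-- the forward while-loop of both Pythons ('while 0 <= x < n and 0 <= y < n: append; step'),
-- made total by fuel; both ports call it with fuel n.toNat + 1, enough for any in-grid start
def pvFwd (n rdx rdy : Int) : Nat → Int → Int → List (Int × Int)
  | 0, _, _ => []
  | f+1, x, y =>
    if 0 ≤ x ∧ x < n ∧ 0 ≤ y ∧ y < n then (x, y) :: pvFwd n rdx rdy f (x + rdx) (y + rdy) else []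

-- A's backward while-loop (steps by -(rdx, rdy))
def pvBack (n rdx rdy : Int) : Nat → Int → Int → List (Int × Int)
  | 0, _, _ => []
  | f+1, x, y =>
    if 0 ≤ x ∧ x < n ∧ 0 ≤ y ∧ y < n then (x, y) :: pvBack n rdx rdy f (x - rdx) (y - rdy) else []

-- A's direction set (math.gcd(abs dx, abs dy) = Int.gcd dx dy)
def pvDirs (n : Int) : PySem.Set (Int × Int) :=
  (PySem.List.pyRange (-(n-1)) n 1).foldl (fun s dx =>
    (PySem.List.pyRange (-(n-1)) n 1).foldl (fun s dy =>
      if dx = 0 ∧ dy = 0 then s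
      else
        let g : Int := Int.gcd dx dy
        let rdx := PySem.Int.floordiv dx g
        let rdy := PySem.Int.floordiv dy g
        if rdx < 0 ∨ (rdx = 0 ∧ rdy < 0) then PySem.Set.add s (-rdx, -rdy)
        else PySem.Set.add s (rdx, rdy)) s) PySem.Set.empty

-- back[::-1] is ported as List.reverse (exact)
def all_lines_py (n : Int) : List (List (Int × Int)) :=
  let lines : PySem.Set (List (Int × Int)) :=
    (pvDirs n).foldl (fun s d =>
      (PySem.List.pyRange 0 n 1).foldl (fun s x0 =>
        (PySem.List.pyRange 0 n 1).foldl (fun s y0 =>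
          let pts := pvFwd n d.1 d.2 (n.toNat + 1) x0 y0
          let back := pvBack n d.1 d.2 (n.toNat + 1) (x0 - d.1) (y0 - d.2)
          let full := PySem.List.sorted (back.reverse ++ pts) pvKp false
          if 3 ≤ PySem.List.len full then PySem.Set.add s full else s) s) s) PySem.Set.empty
  PySem.List.sorted lines pvKl false

-- ===== PORT B =====
def all_lines_py_alt (n : Int) : List (List (Int × Int)) :=
  let lines : List (List (Int × Int)) :=
    (PySem.List.pyRange 0 n 1).foldl (fun acc rdx =>
      (PySem.List.pyRange (-(n-1)) n 1).foldl (fun acc rdy =>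
        if rdx = 0 ∧ rdy ≤ 0 then acc
        else if ¬ ((Int.gcd rdx rdy : Int) = 1) then acc
        else
          (PySem.List.pyRange 0 n 1).foldl (fun acc x0 =>
            (PySem.List.pyRange 0 n 1).foldl (fun acc y0 =>
              if 0 ≤ x0 - rdx ∧ x0 - rdx < n ∧ 0 ≤ y0 - rdy ∧ y0 - rdy < n then acc
              else
                let pts := pvFwd n rdx rdy (n.toNat + 1) x0 y0
                if 3 ≤ PySem.List.len pts then acc ++ [pts] else acc) acc) acc) acc) []
  PySem.List.sorted lines pvKl false

-- ===== PRECONDITION & SPEC =====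
def Spec_all_lines_py (n : Int) (out : List (List (Int × Int))) : Prop := out = all_lines_py_alt n
instance (n : Int) (out : List (List (Int × Int))) : Decidable (Spec_all_lines_py n out) := by unfold Spec_all_lines_py; infer_instance

-- ===== CLAIM (what is proved, stated in full; the proofs are below) =====
def Claim_equal_all_lines_py : Prop := ∀ (n : Int), Dom_all_lines_py n → Spec_all_lines_py n (all_lines_py n)

-- ===== LEMMAS AND PROOFS =====

-- proof-side abbreviations for the two accumulated line lists
def pvLinesA (n : Int) : PySem.Set (List (Int × Int)) :=
  (pvDirs n).foldl (fun s d =>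
    (PySem.List.pyRange 0 n 1).foldl (fun s x0 =>
      (PySem.List.pyRange 0 n 1).foldl (fun s y0 =>
        let pts := pvFwd n d.1 d.2 (n.toNat + 1) x0 y0
        let back := pvBack n d.1 d.2 (n.toNat + 1) (x0 - d.1) (y0 - d.2)
        let full := PySem.List.sorted (back.reverse ++ pts) pvKp false
        if 3 ≤ PySem.List.len full then PySem.Set.add s full else s) s) s) PySem.Set.empty

def pvLinesB (n : Int) : List (List (Int × Int)) :=
  (PySem.List.pyRange 0 n 1).foldl (fun acc rdx =>
    (PySem.List.pyRange (-(n-1)) n 1).foldl (fun acc rdy =>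
      if rdx = 0 ∧ rdy ≤ 0 then acc
      else if ¬ ((Int.gcd rdx rdy : Int) = 1) then acc
      else
        (PySem.List.pyRange 0 n 1).foldl (fun acc x0 =>
          (PySem.List.pyRange 0 n 1).foldl (fun acc y0 =>
            if 0 ≤ x0 - rdx ∧ x0 - rdx < n ∧ 0 ≤ y0 - rdy ∧ y0 - rdy < n then acc
            else
              let pts := pvFwd n rdx rdy (n.toNat + 1) x0 y0
              if 3 ≤ PySem.List.len pts then acc ++ [pts] else acc) acc) acc) acc) []

theorem pvA_eq (n : Int) : all_lines_py n = PySem.List.sorted (pvLinesA n) pvKl false := rfl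
theorem pvB_eq (n : Int) : all_lines_py_alt n = PySem.List.sorted (pvLinesB n) pvKl false := rfl

-- other proof-side helpers
def pvPts (n rdx rdy x0 y0 : Int) : List (Int × Int) := pvFwd n rdx rdy (n.toNat + 1) x0 y0

def pvFull (n rdx rdy x0 y0 : Int) : List (Int × Int) :=
  PySem.List.sorted ((pvBack n rdx rdy (n.toNat + 1) (x0 - rdx) (y0 - rdy)).reverse
    ++ pvPts n rdx rdy x0 y0) pvKp false

def pvDirVal (dx dy : Int) : Int × Int :=
  let g : Int := Int.gcd dx dy
  let rdx := PySem.Int.floordiv dx g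
  let rdy := PySem.Int.floordiv dy g
  if rdx < 0 ∨ (rdx = 0 ∧ rdy < 0) then (-rdx, -rdy) else (rdx, rdy)

def pvDirOK (n rdx rdy : Int) : Prop :=
  0 ≤ rdx ∧ rdx < n ∧ -(n-1) ≤ rdy ∧ rdy < n ∧ ¬(rdx = 0 ∧ rdy ≤ 0) ∧ Int.gcd rdx rdy = 1

-- membership predicates for B's four loop levels
def pvVy0 (n rdx rdy x0 y0 : Int) (y : List (Int × Int)) : Prop :=
  ¬(0 ≤ x0 - rdx ∧ x0 - rdx < n ∧ 0 ≤ y0 - rdy ∧ y0 - rdy < n) ∧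
    3 ≤ (pvPts n rdx rdy x0 y0).length ∧ y = pvPts n rdx rdy x0 y0
def pvVx0 (n rdx rdy x0 : Int) (y : List (Int × Int)) : Prop :=
  ∃ y0 ∈ PySem.List.pyRange 0 n 1, pvVy0 n rdx rdy x0 y0 y
def pvVrdy (n rdx rdy : Int) (y : List (Int × Int)) : Prop :=
  ¬(rdx = 0 ∧ rdy ≤ 0) ∧ Int.gcd rdx rdy = 1 ∧ ∃ x0 ∈ PySem.List.pyRange 0 n 1, pvVx0 n rdx rdy x0 y
def pvVrdx (n rdx : Int) (y : List (Int × Int)) : Prop :=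
  ∃ rdy ∈ PySem.List.pyRange (-(n-1)) n 1, pvVrdy n rdx rdy y

-- signature functions recovering the loop parameters from a produced line
def pvSig0 (y : List (Int × Int)) : Int × Int := y.getD 0 (0, 0)
def pvSigD (y : List (Int × Int)) : Int × Int :=
  ((y.getD 1 (0, 0)).1 - (y.getD 0 (0, 0)).1, (y.getD 1 (0, 0)).2 - (y.getD 0 (0, 0)).2)

-- generic fold lemmas
theorem pvMemFold {α β : Type} (l : List β) (f : List α → β → List α) (P : β → α → Prop)
    (h : ∀ s x y, y ∈ f s x ↔ y ∈ s ∨ P x y) :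
    ∀ s y, y ∈ l.foldl f s ↔ y ∈ s ∨ ∃ x ∈ l, P x y := by
  induction l with
  | nil => simp
  | cons a l ih =>
    intro s y
    rw [List.foldl_cons, ih (f s a) y, h s a y]
    simp only [List.mem_cons]
    constructor
    · rintro ((hy | hp) | ⟨x, hx, hp⟩)
      · exact Or.inl hy
      · exact Or.inr ⟨a, Or.inl rfl, hp⟩
      · exact Or.inr ⟨x, Or.inr hx, hp⟩
    · rintro (hy | ⟨x, (rfl | hx), hp⟩)
      · exact Or.inl (Or.inl hy)
      · exact Or.inl (Or.inr hp)
      · exact Or.inr ⟨x, hx, hp⟩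

theorem pvNodupFold {α β : Type} (l : List β) (f : List α → β → List α)
    (hstep : ∀ s x, s.Nodup → (f s x).Nodup) :
    ∀ s, s.Nodup → (l.foldl f s).Nodup := by
  induction l with
  | nil => intro s hs; simpa using hs
  | cons a l ih => intro s hs; exact ih (f s a) (hstep s a hs)

theorem pvNodupFoldSig {α β : Type} (l : List β) (f : List α → β → List α)
    (V : β → α → Prop) (σ : α → β)
    (hmem : ∀ s x y, y ∈ f s x ↔ y ∈ s ∨ V x y)
    (hstep : ∀ s x, s.Nodup → (∀ y ∈ s, ∀ y', V x y' → y ≠ y') → (f s x).Nodup)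
    (hsig : ∀ x y, V x y → σ y = x) :
    ∀ s, l.Nodup → s.Nodup → (∀ y ∈ s, ∀ x ∈ l, ∀ y', V x y' → y ≠ y') →
      (l.foldl f s).Nodup := by
  induction l with
  | nil => intro s _ hs _; simpa using hs
  | cons a l ih =>
    intro s hl hs hguard
    rw [List.foldl_cons]
    have hal : a ∉ l := (List.nodup_cons.mp hl).1
    refine ih (f s a) (List.nodup_cons.mp hl).2
      (hstep s a hs (fun y hy y' hv => hguard y hy a (List.mem_cons_self) y' hv)) ?_
    intro y hy x hx y' hv
    rcases (hmem s a y).mp hy with hy' | hva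
    · exact hguard y hy' x (List.mem_cons_of_mem a hx) y' hv
    · intro hEq
      subst hEq
      have h1 := hsig a y hva
      have h2 := hsig x y hv
      exact hal (h1 ▸ h2 ▸ hx)

theorem pvPyRangeNodup (a b : Int) : (PySem.List.pyRange a b 1).Nodup := by
  have H : ∀ k a, (b - a).toNat ≤ k → (PySem.List.pyRange a b 1).Nodup := by
    intro k
    induction k with
    | zero =>
      intro a h
      have he : PySem.List.pyRange a b 1 = [] := by
        rw [List.eq_nil_iff_forall_not_mem]
        intro x hx
        rw [PySem.List.mem_pyRange_one] at hx
        omega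
      simp [he]
    | succ k ih =>
      intro a h
      by_cases hab : a < b
      · rw [PySem.List.pyRange_one_cons hab]
        refine List.nodup_cons.mpr ⟨?_, ih (a+1) (by omega)⟩
        intro hmem
        rw [PySem.List.mem_pyRange_one] at hmem
        omega
      · have he : PySem.List.pyRange a b 1 = [] := by
          rw [List.eq_nil_iff_forall_not_mem]
          intro x hx
          rw [PySem.List.mem_pyRange_one] at hx
          omega
        simp [he]
  exact H (b - a).toNat a le_rfl

-- trace-loop lemmas; the canonical-direction hypothesis is 0 < rdx ∨ (rdx = 0 ∧ 0 < rdy);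
-- pvC is the strictly increasing coordinate along the trace
def pvC (rdx x y : Int) : Int := if 0 < rdx then x else y
def pvS (rdx rdy : Int) : Int := if 0 < rdx then rdx else rdy

theorem pvFwd_out (n rdx rdy : Int) (f : Nat) (x y : Int)
    (h : ¬(0 ≤ x ∧ x < n ∧ 0 ≤ y ∧ y < n)) : pvFwd n rdx rdy f x y = [] := by
  cases f <;> simp [pvFwd, h]

theorem pvBack_out (n rdx rdy : Int) (f : Nat) (x y : Int)
    (h : ¬(0 ≤ x ∧ x < n ∧ 0 ≤ y ∧ y < n)) : pvBack n rdx rdy f x y = [] := by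
  cases f <;> simp [pvBack, h]

theorem pvFwd_cons (n rdx rdy : Int) (f : Nat) (x y : Int)
    (h : 0 ≤ x ∧ x < n ∧ 0 ≤ y ∧ y < n) :
    pvFwd n rdx rdy (f+1) x y = (x, y) :: pvFwd n rdx rdy f (x + rdx) (y + rdy) := by
  simp [pvFwd, h]

theorem pvBack_cons (n rdx rdy : Int) (f : Nat) (x y : Int)
    (h : 0 ≤ x ∧ x < n ∧ 0 ≤ y ∧ y < n) :
    pvBack n rdx rdy (f+1) x y = (x, y) :: pvBack n rdx rdy f (x - rdx) (y - rdy) := by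
  simp [pvBack, h]

theorem pvFwd_stable (n rdx rdy : Int) (hc : 0 < rdx ∨ (rdx = 0 ∧ 0 < rdy)) :
    ∀ f g x y, (n - pvC rdx x y).toNat ≤ f → (n - pvC rdx x y).toNat ≤ g →
      pvFwd n rdx rdy f x y = pvFwd n rdx rdy g x y := by
  have hstep : ∀ x y, pvC rdx (x + rdx) (y + rdy) = pvC rdx x y + pvS rdx rdy := by
    intro x y; unfold pvC pvS; split <;> rfl
  have hs1 : 1 ≤ pvS rdx rdy := by
    unfold pvS; rcases hc with h | ⟨h1, h2⟩
    · rw [if_pos h]; omega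
    · rw [if_neg (by omega)]; omega
  intro f
  induction f with
  | zero =>
    intro g x y h1 h2
    by_cases hG : 0 ≤ x ∧ x < n ∧ 0 ≤ y ∧ y < n
    · exfalso
      have hcn : pvC rdx x y < n := by unfold pvC; split <;> omega
      omega
    · rw [pvFwd_out n rdx rdy _ _ _ hG, pvFwd_out n rdx rdy _ _ _ hG]
  | succ f ih =>
    intro g x y h1 h2
    by_cases hG : 0 ≤ x ∧ x < n ∧ 0 ≤ y ∧ y < n
    · have hcn : pvC rdx x y < n ∧ 0 ≤ pvC rdx x y := by unfold pvC; split <;> omega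
      obtain ⟨g', rfl⟩ : ∃ g', g = g' + 1 := by
        cases g with
        | zero => exfalso; omega
        | succ g' => exact ⟨g', rfl⟩
      rw [pvFwd_cons n rdx rdy f x y hG, pvFwd_cons n rdx rdy g' x y hG]
      congr 1
      exact ih g' (x + rdx) (y + rdy) (by rw [hstep]; omega) (by rw [hstep]; omega)
    · rw [pvFwd_out n rdx rdy _ _ _ hG, pvFwd_out n rdx rdy _ _ _ hG]

theorem pvBack_stable (n rdx rdy : Int) (hc : 0 < rdx ∨ (rdx = 0 ∧ 0 < rdy)) :
    ∀ f g x y, (pvC rdx x y + 1).toNat ≤ f → (pvC rdx x y + 1).toNat ≤ g →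
      pvBack n rdx rdy f x y = pvBack n rdx rdy g x y := by
  have hstep : ∀ x y, pvC rdx (x - rdx) (y - rdy) = pvC rdx x y - pvS rdx rdy := by
    intro x y; unfold pvC pvS; split <;> rfl
  have hs1 : 1 ≤ pvS rdx rdy := by
    unfold pvS; rcases hc with h | ⟨h1, h2⟩
    · rw [if_pos h]; omega
    · rw [if_neg (by omega)]; omega
  intro f
  induction f with
  | zero =>
    intro g x y h1 h2
    by_cases hG : 0 ≤ x ∧ x < n ∧ 0 ≤ y ∧ y < n
    · exfalso
      have hcn : 0 ≤ pvC rdx x y := by unfold pvC; split <;> omega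
      omega
    · rw [pvBack_out n rdx rdy _ _ _ hG, pvBack_out n rdx rdy _ _ _ hG]
  | succ f ih =>
    intro g x y h1 h2
    by_cases hG : 0 ≤ x ∧ x < n ∧ 0 ≤ y ∧ y < n
    · have hcn : 0 ≤ pvC rdx x y := by unfold pvC; split <;> omega
      obtain ⟨g', rfl⟩ : ∃ g', g = g' + 1 := by
        cases g with
        | zero => exfalso; omega
        | succ g' => exact ⟨g', rfl⟩
      rw [pvBack_cons n rdx rdy f x y hG, pvBack_cons n rdx rdy g' x y hG]
      congr 1
      exact ih g' (x - rdx) (y - rdy) (by rw [hstep]; omega) (by rw [hstep]; omega)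
    · rw [pvBack_out n rdx rdy _ _ _ hG, pvBack_out n rdx rdy _ _ _ hG]

theorem pvStepLt (rdx rdy x y : Int) (hc : 0 < rdx ∨ (rdx = 0 ∧ 0 < rdy)) :
    pvKp (x, y) < pvKp (x + rdx, y + rdy) := by
  simp only [pvKp, Prod.Lex.lt_iff, ofLex_toLex]
  rcases hc with h | ⟨h1, h2⟩ <;> omega

theorem pvFwd_ge (n rdx rdy : Int) (hc : 0 < rdx ∨ (rdx = 0 ∧ 0 < rdy)) :
    ∀ f x y p, p ∈ pvFwd n rdx rdy f x y → pvKp (x, y) ≤ pvKp p := by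
  intro f
  induction f with
  | zero => intro x y p hp; simp [pvFwd] at hp
  | succ f ih =>
    intro x y p hp
    by_cases hG : 0 ≤ x ∧ x < n ∧ 0 ≤ y ∧ y < n
    · rw [pvFwd_cons n rdx rdy f x y hG] at hp
      rcases List.mem_cons.mp hp with rfl | hp'
      · exact le_refl _
      · exact le_trans (le_of_lt (pvStepLt rdx rdy x y hc)) (ih (x + rdx) (y + rdy) p hp')
    · rw [pvFwd_out n rdx rdy _ _ _ hG] at hp
      simp at hp

theorem pvFwd_pairwise (n rdx rdy : Int) (hc : 0 < rdx ∨ (rdx = 0 ∧ 0 < rdy)) :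
    ∀ f x y, (pvFwd n rdx rdy f x y).Pairwise (fun p q => pvKp p < pvKp q) := by
  intro f
  induction f with
  | zero => intro x y; simp [pvFwd]
  | succ f ih =>
    intro x y
    by_cases hG : 0 ≤ x ∧ x < n ∧ 0 ≤ y ∧ y < n
    · rw [pvFwd_cons n rdx rdy f x y hG]
      refine List.pairwise_cons.mpr ⟨?_, ih (x + rdx) (y + rdy)⟩
      intro p hp
      exact lt_of_lt_of_le (pvStepLt rdx rdy x y hc) (pvFwd_ge n rdx rdy hc f (x + rdx) (y + rdy) p hp)
    · rw [pvFwd_out n rdx rdy _ _ _ hG]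
      simp

theorem pvSorted_fwd (n rdx rdy : Int) (hc : 0 < rdx ∨ (rdx = 0 ∧ 0 < rdy)) (f : Nat) (x y : Int) :
    PySem.List.sorted (pvFwd n rdx rdy f x y) pvKp false = pvFwd n rdx rdy f x y :=
  PySem.List.sorted_eq_self_of_pairwise _ _ ((pvFwd_pairwise n rdx rdy hc f x y).imp le_of_lt)

theorem pvGlue (n rdx rdy : Int) (hc : 0 < rdx ∨ (rdx = 0 ∧ 0 < rdy)) :
    ∀ x y, (0 ≤ x ∧ x < n ∧ 0 ≤ y ∧ y < n) →
      ∃ b1 b2, (0 ≤ b1 ∧ b1 < n ∧ 0 ≤ b2 ∧ b2 < n) ∧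
        ¬(0 ≤ b1 - rdx ∧ b1 - rdx < n ∧ 0 ≤ b2 - rdy ∧ b2 - rdy < n) ∧
        (pvBack n rdx rdy (n.toNat + 1) (x - rdx) (y - rdy)).reverse
            ++ pvFwd n rdx rdy (n.toNat + 1) x y
          = pvFwd n rdx rdy (n.toNat + 1) b1 b2 := by
  have hs1 : 1 ≤ pvS rdx rdy := by
    unfold pvS; rcases hc with h | ⟨h1, h2⟩
    · rw [if_pos h]; omega
    · rw [if_neg (by omega)]; omega
  have hcdef : ∀ x y : Int, pvC rdx x y = if 0 < rdx then x else y := fun _ _ => rfl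
  have hsdef : pvS rdx rdy = if 0 < rdx then rdx else rdy := rfl
  have H : ∀ k x y, (pvC rdx x y).toNat ≤ k → (0 ≤ x ∧ x < n ∧ 0 ≤ y ∧ y < n) →
      ∃ b1 b2, (0 ≤ b1 ∧ b1 < n ∧ 0 ≤ b2 ∧ b2 < n) ∧
        ¬(0 ≤ b1 - rdx ∧ b1 - rdx < n ∧ 0 ≤ b2 - rdy ∧ b2 - rdy < n) ∧
        (pvBack n rdx rdy (n.toNat + 1) (x - rdx) (y - rdy)).reverse
            ++ pvFwd n rdx rdy (n.toNat + 1) x y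
          = pvFwd n rdx rdy (n.toNat + 1) b1 b2 := by
    intro k
    induction k with
    | zero =>
      intro x y hk hG
      by_cases hP : 0 ≤ x - rdx ∧ x - rdx < n ∧ 0 ≤ y - rdy ∧ y - rdy < n
      · exfalso
        have h1 : 0 ≤ pvC rdx (x - rdx) (y - rdy) := by rw [hcdef]; split_ifs with h <;> [exact hP.1; exact hP.2.2.1]
        have h2 : pvC rdx (x - rdx) (y - rdy) = pvC rdx x y - pvS rdx rdy := by
          rw [hcdef, hcdef, hsdef]; split <;> rfl
        omega
      · refine ⟨x, y, hG, hP, ?_⟩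
        rw [pvBack_out n rdx rdy _ _ _ hP]
        simp
    | succ k ih =>
      intro x y hk hG
      by_cases hP : 0 ≤ x - rdx ∧ x - rdx < n ∧ 0 ≤ y - rdy ∧ y - rdy < n
      · have hc0 : 0 ≤ pvC rdx x y ∧ pvC rdx x y < n := by
          rw [hcdef]; split_ifs <;> omega
        have hcP : pvC rdx (x - rdx) (y - rdy) = pvC rdx x y - pvS rdx rdy := by
          rw [hcdef, hcdef, hsdef]; split <;> rfl
        have hcP0 : 0 ≤ pvC rdx (x - rdx) (y - rdy) := by
          rw [hcdef]; split_ifs with h <;> [exact hP.1; exact hP.2.2.1]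
        have hcPP : pvC rdx (x - rdx - rdx) (y - rdy - rdy) = pvC rdx x y - 2 * pvS rdx rdy := by
          rw [hcdef, hcdef, hsdef]; split <;> ring
        rw [pvBack_cons n rdx rdy n.toNat (x - rdx) (y - rdy) hP]
        rw [pvBack_stable n rdx rdy hc n.toNat (n.toNat + 1) (x - rdx - rdx) (y - rdy - rdy)
          (by omega) (by omega)]
        rw [List.reverse_cons, List.append_assoc]
        have h1 : pvFwd n rdx rdy (n.toNat + 1) (x - rdx) (y - rdy)
            = (x - rdx, y - rdy) :: pvFwd n rdx rdy n.toNat x y := by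
          have e1 : x - rdx + rdx = x := by ring
          have e2 : y - rdy + rdy = y := by ring
          rw [pvFwd_cons n rdx rdy n.toNat (x - rdx) (y - rdy) hP, e1, e2]
        have h2 : pvFwd n rdx rdy n.toNat x y = pvFwd n rdx rdy (n.toNat + 1) x y :=
          pvFwd_stable n rdx rdy hc n.toNat (n.toNat + 1) x y (by omega) (by omega)
        have h3 : ([(x - rdx, y - rdy)] ++ pvFwd n rdx rdy (n.toNat + 1) x y)
            = pvFwd n rdx rdy (n.toNat + 1) (x - rdx) (y - rdy) := by
          rw [h1, h2]; rfl
        rw [h3]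
        exact ih (x - rdx) (y - rdy) (by omega) hP
      · refine ⟨x, y, hG, hP, ?_⟩
        rw [pvBack_out n rdx rdy _ _ _ hP]
        simp
  intro x y hG
  exact H (pvC rdx x y).toNat x y le_rfl hG

theorem pvFwd_two (n rdx rdy : Int) (f : Nat) (x y : Int)
    (h3 : 3 ≤ (pvFwd n rdx rdy f x y).length) :
    (∃ t, pvFwd n rdx rdy f x y = (x, y) :: (x + rdx, y + rdy) :: t) ∧
      (0 ≤ x ∧ x < n ∧ 0 ≤ y ∧ y < n) := by
  cases f with
  | zero => simp [pvFwd] at h3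
  | succ f =>
    by_cases hG : 0 ≤ x ∧ x < n ∧ 0 ≤ y ∧ y < n
    · refine ⟨?_, hG⟩
      rw [pvFwd_cons n rdx rdy f x y hG] at h3 ⊢
      cases f with
      | zero => simp [pvFwd] at h3
      | succ f =>
        by_cases hG2 : 0 ≤ x + rdx ∧ x + rdx < n ∧ 0 ≤ y + rdy ∧ y + rdy < n
        · rw [pvFwd_cons n rdx rdy f _ _ hG2]
          exact ⟨_, rfl⟩
        · rw [pvFwd_out n rdx rdy _ _ _ hG2] at h3
          simp at h3
    · rw [pvFwd_out n rdx rdy _ _ _ hG] at h3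
      simp at h3

theorem pvSig_of_Vy0 (n rdx rdy x0 y0 : Int) (y : List (Int × Int))
    (h : pvVy0 n rdx rdy x0 y0 y) : pvSig0 y = (x0, y0) ∧ pvSigD y = (rdx, rdy) := by
  obtain ⟨hbase, h3, hy⟩ := h
  obtain ⟨⟨t, ht⟩, hG⟩ := pvFwd_two n rdx rdy (n.toNat + 1) x0 y0 h3
  subst hy
  unfold pvPts
  rw [ht]
  refine ⟨by simp [pvSig0], ?_⟩
  simp only [pvSigD, List.getD_cons_succ, List.getD_cons_zero]
  norm_num

-- direction-set arithmetic
theorem pvMem_pvDirs (n : Int) (d : Int × Int) :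
    d ∈ pvDirs n ↔ ∃ dx ∈ PySem.List.pyRange (-(n-1)) n 1, ∃ dy ∈ PySem.List.pyRange (-(n-1)) n 1,
      ¬(dx = 0 ∧ dy = 0) ∧ d = pvDirVal dx dy := by
  unfold pvDirs
  refine (pvMemFold _ _
    (fun dx d => ∃ dy ∈ PySem.List.pyRange (-(n-1)) n 1, ¬(dx = 0 ∧ dy = 0) ∧ d = pvDirVal dx dy)
    ?_ PySem.Set.empty d).trans (by simp [PySem.Set.empty])
  intro s dx z
  dsimp only
  refine pvMemFold _ _ (fun dy z => ¬(dx = 0 ∧ dy = 0) ∧ z = pvDirVal dx dy) ?_ s z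
  intro s dy z
  dsimp only
  by_cases h0 : dx = 0 ∧ dy = 0
  · rw [if_pos h0]
    constructor
    · exact Or.inl
    · rintro (h | ⟨hn, -⟩)
      · exact h
      · exact absurd h0 hn
  · rw [if_neg h0]
    by_cases hsgn : PySem.Int.floordiv dx (Int.gcd dx dy) < 0 ∨
        (PySem.Int.floordiv dx (Int.gcd dx dy) = 0 ∧ PySem.Int.floordiv dy (Int.gcd dx dy) < 0)
    · rw [if_pos hsgn, PySem.Set.mem_add]
      constructor
      · rintro (h | h)
        · exact Or.inl h
        · exact Or.inr ⟨h0, by simp only [pvDirVal]; rw [if_pos hsgn]; exact h⟩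
      · rintro (h | ⟨-, h⟩)
        · exact Or.inl h
        · simp only [pvDirVal] at h
          rw [if_pos hsgn] at h
          exact Or.inr h
    · rw [if_neg hsgn, PySem.Set.mem_add]
      constructor
      · rintro (h | h)
        · exact Or.inl h
        · exact Or.inr ⟨h0, by simp only [pvDirVal]; rw [if_neg hsgn]; exact h⟩
      · rintro (h | ⟨-, h⟩)
        · exact Or.inl h
        · simp only [pvDirVal] at h
          rw [if_neg hsgn] at h
          exact Or.inr h

theorem pvDirs_iff (n : Int) (d : Int × Int) : d ∈ pvDirs n ↔ pvDirOK n d.1 d.2 := by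
  rw [pvMem_pvDirs]
  constructor
  · rintro ⟨dx, hdx, dy, hdy, hnz, rfl⟩
    rw [PySem.List.mem_pyRange_one] at hdx hdy
    have hgpos : 0 < Int.gcd dx dy := Int.gcd_pos_iff.mpr (by tauto)
    have hg1 : (0:Int) < (Int.gcd dx dy : Int) := by exact_mod_cast hgpos
    have hfdx : PySem.Int.floordiv dx (Int.gcd dx dy) = dx / (Int.gcd dx dy : Int) :=
      PySem.Int.floordiv_eq_ediv_of_pos hg1
    have hfdy : PySem.Int.floordiv dy (Int.gcd dx dy) = dy / (Int.gcd dx dy : Int) :=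
      PySem.Int.floordiv_eq_ediv_of_pos hg1
    have hx : dx / (Int.gcd dx dy : Int) * (Int.gcd dx dy : Int) = dx :=
      Int.ediv_mul_cancel (Int.gcd_dvd_left dx dy)
    have hy : dy / (Int.gcd dx dy : Int) * (Int.gcd dx dy : Int) = dy :=
      Int.ediv_mul_cancel (Int.gcd_dvd_right dx dy)
    have habsx : |dx / (Int.gcd dx dy : Int)| ≤ |dx| := Int.abs_ediv_le_abs dx _
    have habsy : |dy / (Int.gcd dx dy : Int)| ≤ |dy| := Int.abs_ediv_le_abs dy _
    rw [abs_le] at habsx habsy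
    have hbx : |dx| ≤ n - 1 := abs_le.mpr (by omega)
    have hby : |dy| ≤ n - 1 := abs_le.mpr (by omega)
    have hco : Int.gcd (dx / (Int.gcd dx dy : Int)) (dy / (Int.gcd dx dy : Int)) = 1 :=
      Int.gcd_div_gcd_div_gcd hgpos
    have h0x : dx / (Int.gcd dx dy : Int) = 0 → dx = 0 := by
      intro h; rw [← hx, h, zero_mul]
    have h0y : dy / (Int.gcd dx dy : Int) = 0 → dy = 0 := by
      intro h; rw [← hy, h, zero_mul]
    simp only [pvDirVal]
    rw [hfdx, hfdy]
    by_cases hsgn : dx / (Int.gcd dx dy : Int) < 0 ∨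
        (dx / (Int.gcd dx dy : Int) = 0 ∧ dy / (Int.gcd dx dy : Int) < 0)
    · rw [if_pos hsgn]
      unfold pvDirOK
      dsimp only
      have hgcd : Int.gcd (-(dx / (Int.gcd dx dy : Int))) (-(dy / (Int.gcd dx dy : Int))) = 1 := by
        rw [Int.neg_gcd, Int.gcd_neg]; exact hco
      rcases hsgn with hneg | ⟨hz, hneg⟩ <;>
        exact ⟨by omega, by omega, by omega, by omega, by omega, hgcd⟩
    · rw [if_neg hsgn]
      unfold pvDirOK
      dsimp only
      rw [not_or, not_and_or] at hsgn
      exact ⟨by omega, by omega, by omega, by omega, by omega, hco⟩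
  · intro h
    obtain ⟨h1, h2, h3, h4, h5, h6⟩ := h
    refine ⟨d.1, ?_, d.2, ?_, ?_, ?_⟩
    · rw [PySem.List.mem_pyRange_one]; omega
    · rw [PySem.List.mem_pyRange_one]; omega
    · rintro ⟨e1, e2⟩
      rw [e1, e2] at h6
      simp [Int.gcd] at h6
    · simp only [pvDirVal, h6]
      have hf1 : ∀ a : Int, PySem.Int.floordiv a ((1:Nat) : Int) = a := by
        intro a
        rw [PySem.Int.floordiv_eq_ediv_of_pos (by norm_num)]
        simp
      rw [hf1, hf1]
      rw [if_neg (by omega)]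

theorem pvDirOK_canon (n rdx rdy : Int) (h : pvDirOK n rdx rdy) :
    0 < rdx ∨ (rdx = 0 ∧ 0 < rdy) := by
  rcases h with ⟨h1, _, _, _, h5, _⟩
  rcases lt_or_eq_of_le h1 with h | h
  · exact Or.inl h
  · exact Or.inr ⟨h.symm, by omega⟩


theorem pvLen3 (xs : List (Int × Int)) : (3 ≤ PySem.List.len xs) ↔ 3 ≤ xs.length := by
  rw [PySem.List.len_eq]; exact_mod_cast Iff.rfl

theorem pvMemA_x0 (n rdx rdy x0 : Int) (s : PySem.Set (List (Int × Int))) (y : List (Int × Int)) :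
    y ∈ (PySem.List.pyRange 0 n 1).foldl (fun s y0 =>
        let pts := pvFwd n rdx rdy (n.toNat + 1) x0 y0
        let back := pvBack n rdx rdy (n.toNat + 1) (x0 - rdx) (y0 - rdy)
        let full := PySem.List.sorted (back.reverse ++ pts) pvKp false
        if 3 ≤ PySem.List.len full then PySem.Set.add s full else s) s
      ↔ y ∈ s ∨ ∃ y0 ∈ PySem.List.pyRange 0 n 1,
          3 ≤ (pvFull n rdx rdy x0 y0).length ∧ y = pvFull n rdx rdy x0 y0 := by
  refine pvMemFold _ _
    (fun y0 y => 3 ≤ (pvFull n rdx rdy x0 y0).length ∧ y = pvFull n rdx rdy x0 y0) ?_ s y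
  intro s y0 z
  dsimp only
  by_cases h3 : 3 ≤ PySem.List.len (PySem.List.sorted
      ((pvBack n rdx rdy (n.toNat + 1) (x0 - rdx) (y0 - rdy)).reverse
        ++ pvFwd n rdx rdy (n.toNat + 1) x0 y0) pvKp false)
  · rw [if_pos h3, PySem.Set.mem_add]
    have h3' : 3 ≤ (pvFull n rdx rdy x0 y0).length := by
      simp only [pvFull, pvPts]; exact (pvLen3 _).mp h3
    constructor
    · rintro (h | h)
      · exact Or.inl h
      · exact Or.inr ⟨h3', by simp only [pvFull, pvPts]; exact h⟩
    · rintro (h | ⟨-, h⟩)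
      · exact Or.inl h
      · simp only [pvFull, pvPts] at h
        exact Or.inr h
  · rw [if_neg h3]
    constructor
    · exact Or.inl
    · rintro (h | ⟨h33, -⟩)
      · exact h
      · refine absurd ?_ h3
        simp only [pvFull, pvPts] at h33
        exact (pvLen3 _).mpr h33

-- membership characterizations of the two accumulated lists
theorem pvMemA (n : Int) (y : List (Int × Int)) :
    y ∈ pvLinesA n ↔ ∃ d ∈ pvDirs n, ∃ x0 ∈ PySem.List.pyRange 0 n 1,
      ∃ y0 ∈ PySem.List.pyRange 0 n 1,
        3 ≤ (pvFull n d.1 d.2 x0 y0).length ∧ y = pvFull n d.1 d.2 x0 y0 := by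
  unfold pvLinesA
  refine (pvMemFold _ _
    (fun d y => ∃ x0 ∈ PySem.List.pyRange 0 n 1, ∃ y0 ∈ PySem.List.pyRange 0 n 1,
      3 ≤ (pvFull n d.1 d.2 x0 y0).length ∧ y = pvFull n d.1 d.2 x0 y0) ?_ PySem.Set.empty y).trans
    (by simp [PySem.Set.empty])
  intro s d z
  dsimp only
  refine pvMemFold _ _
    (fun x0 z => ∃ y0 ∈ PySem.List.pyRange 0 n 1,
      3 ≤ (pvFull n d.1 d.2 x0 y0).length ∧ z = pvFull n d.1 d.2 x0 y0) ?_ s z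
  intro s x0 z
  exact pvMemA_x0 n d.1 d.2 x0 s z


theorem pvMemB_y0Step (n rdx rdy x0 y0 : Int) (s : List (List (Int × Int))) (z : List (Int × Int)) :
    z ∈ (if 0 ≤ x0 - rdx ∧ x0 - rdx < n ∧ 0 ≤ y0 - rdy ∧ y0 - rdy < n then s
        else if 3 ≤ PySem.List.len (pvFwd n rdx rdy (n.toNat + 1) x0 y0)
          then s ++ [pvFwd n rdx rdy (n.toNat + 1) x0 y0] else s)
      ↔ z ∈ s ∨ pvVy0 n rdx rdy x0 y0 z := by
  by_cases hb : 0 ≤ x0 - rdx ∧ x0 - rdx < n ∧ 0 ≤ y0 - rdy ∧ y0 - rdy < n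
  · rw [if_pos hb]
    simp only [pvVy0]
    constructor
    · exact Or.inl
    · rintro (h | ⟨hnb, -, -⟩)
      · exact h
      · exact absurd hb hnb
  · rw [if_neg hb]
    by_cases h3 : 3 ≤ PySem.List.len (pvFwd n rdx rdy (n.toNat + 1) x0 y0)
    · rw [if_pos h3]
      have h3' := (pvLen3 _).mp h3
      simp only [List.mem_append, List.mem_singleton, pvVy0, pvPts]
      constructor
      · rintro (h | h)
        · exact Or.inl h
        · exact Or.inr ⟨hb, h3', h⟩
      · rintro (h | ⟨-, -, h⟩)
        · exact Or.inl h
        · exact Or.inr h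
    · rw [if_neg h3]
      simp only [pvVy0, pvPts]
      constructor
      · exact Or.inl
      · rintro (h | ⟨-, h33, -⟩)
        · exact h
        · exact absurd ((pvLen3 _).mpr h33) h3

theorem pvMemB_x0 (n rdx rdy x0 : Int) (acc : List (List (Int × Int))) (y : List (Int × Int)) :
    y ∈ (PySem.List.pyRange 0 n 1).foldl (fun acc y0 =>
        if 0 ≤ x0 - rdx ∧ x0 - rdx < n ∧ 0 ≤ y0 - rdy ∧ y0 - rdy < n then acc
        else
          let pts := pvFwd n rdx rdy (n.toNat + 1) x0 y0
          if 3 ≤ PySem.List.len pts then acc ++ [pts] else acc) acc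
      ↔ y ∈ acc ∨ pvVx0 n rdx rdy x0 y := by
  refine (pvMemFold _ _ (pvVy0 n rdx rdy x0) ?_ acc y).trans (by rw [pvVx0])
  intro s y0 z
  exact pvMemB_y0Step n rdx rdy x0 y0 s z

theorem pvMemB_rdyStep (n rdx rdy : Int) (s : List (List (Int × Int))) (z : List (Int × Int)) :
    z ∈ (if rdx = 0 ∧ rdy ≤ 0 then s
        else if ¬ ((Int.gcd rdx rdy : Int) = 1) then s
        else
          (PySem.List.pyRange 0 n 1).foldl (fun acc x0 =>
            (PySem.List.pyRange 0 n 1).foldl (fun acc y0 =>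
              if 0 ≤ x0 - rdx ∧ x0 - rdx < n ∧ 0 ≤ y0 - rdy ∧ y0 - rdy < n then acc
              else
                let pts := pvFwd n rdx rdy (n.toNat + 1) x0 y0
                if 3 ≤ PySem.List.len pts then acc ++ [pts] else acc) acc) s)
      ↔ z ∈ s ∨ pvVrdy n rdx rdy z := by
  by_cases h1 : rdx = 0 ∧ rdy ≤ 0
  · rw [if_pos h1]
    simp only [pvVrdy]
    constructor
    · exact Or.inl
    · rintro (h | ⟨hn, -, -⟩)
      · exact h
      · exact absurd h1 hn
  · rw [if_neg h1]
    by_cases h2 : (Int.gcd rdx rdy : Int) = 1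
    · rw [if_neg (not_not_intro h2)]
      have hg : Int.gcd rdx rdy = 1 := by exact_mod_cast h2
      refine (pvMemFold _ _ (pvVx0 n rdx rdy) ?_ s z).trans ?_
      · intro s x0 z
        exact pvMemB_x0 n rdx rdy x0 s z
      · simp only [pvVrdy]
        constructor
        · rintro (h | ⟨x0, hx0, hv⟩)
          · exact Or.inl h
          · exact Or.inr ⟨h1, hg, x0, hx0, hv⟩
        · rintro (h | ⟨-, -, x0, hx0, hv⟩)
          · exact Or.inl h
          · exact Or.inr ⟨x0, hx0, hv⟩
    · rw [if_pos h2]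
      simp only [pvVrdy]
      constructor
      · exact Or.inl
      · rintro (h | ⟨-, hgg, -⟩)
        · exact h
        · exact absurd (by exact_mod_cast hgg : (Int.gcd rdx rdy : Int) = 1) h2

theorem pvMemB_rdx (n rdx : Int) (acc : List (List (Int × Int))) (y : List (Int × Int)) :
    y ∈ (PySem.List.pyRange (-(n-1)) n 1).foldl (fun acc rdy =>
        if rdx = 0 ∧ rdy ≤ 0 then acc
        else if ¬ ((Int.gcd rdx rdy : Int) = 1) then acc
        else
          (PySem.List.pyRange 0 n 1).foldl (fun acc x0 =>
            (PySem.List.pyRange 0 n 1).foldl (fun acc y0 =>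
              if 0 ≤ x0 - rdx ∧ x0 - rdx < n ∧ 0 ≤ y0 - rdy ∧ y0 - rdy < n then acc
              else
                let pts := pvFwd n rdx rdy (n.toNat + 1) x0 y0
                if 3 ≤ PySem.List.len pts then acc ++ [pts] else acc) acc) acc) acc
      ↔ y ∈ acc ∨ pvVrdx n rdx y := by
  refine (pvMemFold _ _ (pvVrdy n rdx) ?_ acc y).trans (by rw [pvVrdx])
  intro s rdy z
  exact pvMemB_rdyStep n rdx rdy s z


theorem pvMemB (n : Int) (y : List (Int × Int)) :
    y ∈ pvLinesB n ↔ ∃ rdx ∈ PySem.List.pyRange 0 n 1, pvVrdx n rdx y := by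
  unfold pvLinesB
  refine (pvMemFold _ _ (pvVrdx n) ?_ [] y).trans (by simp)
  intro s rdx z
  exact pvMemB_rdx n rdx s z

theorem pvNodupA (n : Int) : (pvLinesA n).Nodup := by
  unfold pvLinesA
  refine pvNodupFold _ _ ?_ _ (by simp [PySem.Set.empty])
  intro s d hs
  dsimp only
  refine pvNodupFold _ _ ?_ _ hs
  intro s x0 hs
  refine pvNodupFold _ _ ?_ _ hs
  intro s y0 hs
  dsimp only
  split_ifs
  · exact PySem.Set.nodup_add _ _ hs
  · exact hs

theorem pvNodupB (n : Int) : (pvLinesB n).Nodup := by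
  unfold pvLinesB
  refine pvNodupFoldSig _ _ (pvVrdx n) (fun y => (pvSigD y).1) ?_ ?_ ?_ _
    (pvPyRangeNodup 0 n) (by simp) (by simp)
  · intro s rdx y
    exact pvMemB_rdx n rdx s y
  · -- rdy level
    intro s rdx hs hg
    dsimp only
    refine pvNodupFoldSig _ _ (pvVrdy n rdx) (fun y => (pvSigD y).2) ?_ ?_ ?_ s
      (pvPyRangeNodup (-(n-1)) n) hs
      (fun y hy rdy _ y' hv => hg y hy y' ⟨rdy, by assumption, hv⟩)
    · intro s rdy z
      exact pvMemB_rdyStep n rdx rdy s z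
    · intro s rdy hs hg2
      dsimp only
      by_cases h1 : rdx = 0 ∧ rdy ≤ 0
      · rw [if_pos h1]; exact hs
      · rw [if_neg h1]
        by_cases h2 : (Int.gcd rdx rdy : Int) = 1
        · rw [if_neg (not_not_intro h2)]
          have hg' : Int.gcd rdx rdy = 1 := by exact_mod_cast h2
          refine pvNodupFoldSig _ _ (pvVx0 n rdx rdy) (fun y => (pvSig0 y).1) ?_ ?_ ?_ s
            (pvPyRangeNodup 0 n) hs
            (fun y hy x0 hx0 y' hv => hg2 y hy y' ⟨h1, hg', x0, hx0, hv⟩)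
          · intro s x0 z
            exact pvMemB_x0 n rdx rdy x0 s z
          · intro s x0 hs hg3
            refine pvNodupFoldSig _ _ (pvVy0 n rdx rdy x0) (fun y => (pvSig0 y).2) ?_ ?_ ?_ s
              (pvPyRangeNodup 0 n) hs
              (fun y hy y0 hy0 y' hv => hg3 y hy y' ⟨y0, hy0, hv⟩)
            · intro s y0 z
              exact pvMemB_y0Step n rdx rdy x0 y0 s z
            · intro s y0 hs hg4
              dsimp only
              by_cases hb : 0 ≤ x0 - rdx ∧ x0 - rdx < n ∧ 0 ≤ y0 - rdy ∧ y0 - rdy < n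
              · rw [if_pos hb]; exact hs
              · rw [if_neg hb]
                by_cases h3 : 3 ≤ PySem.List.len (pvFwd n rdx rdy (n.toNat + 1) x0 y0)
                · rw [if_pos h3, List.nodup_append]
                  refine ⟨hs, List.nodup_singleton _, ?_⟩
                  intro a ha b hb5
                  rw [List.mem_singleton] at hb5
                  subst hb5
                  exact hg4 a ha _ ⟨hb, (pvLen3 _).mp h3, rfl⟩
                · rw [if_neg h3]; exact hs
            · intro y0 y hv
              dsimp only
              rw [(pvSig_of_Vy0 n rdx rdy x0 y0 y hv).1]
          · intro x0 y hv
            obtain ⟨y0, hy0, hv0⟩ := hv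
            dsimp only
            rw [(pvSig_of_Vy0 n rdx rdy x0 y0 y hv0).1]
        · rw [if_pos h2]; exact hs
    · intro rdy y hv
      obtain ⟨-, -, x0, -, y0, -, hv0⟩ := hv
      dsimp only
      rw [(pvSig_of_Vy0 n rdx rdy x0 y0 y hv0).2]
  · intro rdx y hv
    obtain ⟨rdy, -, -, -, x0, -, y0, -, hv0⟩ := hv
    dsimp only
    rw [(pvSig_of_Vy0 n rdx rdy x0 y0 y hv0).2]

theorem pvMemIff (n : Int) (y : List (Int × Int)) : y ∈ pvLinesA n ↔ y ∈ pvLinesB n := by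
  rw [pvMemA n y, pvMemB n y]
  constructor
  · rintro ⟨d, hd, x0, hx0, y0, hy0, h3, rfl⟩
    have hOK := (pvDirs_iff n d).mp hd
    have hc := pvDirOK_canon n d.1 d.2 hOK
    rw [PySem.List.mem_pyRange_one] at hx0 hy0
    obtain ⟨b1, b2, hGb, hnb, heq⟩ :=
      pvGlue n d.1 d.2 hc x0 y0 ⟨hx0.1, hx0.2, hy0.1, hy0.2⟩
    have hfull : pvFull n d.1 d.2 x0 y0 = pvFwd n d.1 d.2 (n.toNat + 1) b1 b2 := by
      unfold pvFull pvPts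
      rw [heq]
      exact pvSorted_fwd n d.1 d.2 hc _ b1 b2
    refine ⟨d.1, ?_, d.2, ?_, ?_, hOK.2.2.2.2.2, b1, ?_, b2, ?_, hnb, ?_, ?_⟩
    · rw [PySem.List.mem_pyRange_one]
      exact ⟨hOK.1, hOK.2.1⟩
    · rw [PySem.List.mem_pyRange_one]
      exact ⟨hOK.2.2.1, hOK.2.2.2.1⟩
    · exact hOK.2.2.2.2.1
    · rw [PySem.List.mem_pyRange_one]; omega
    · rw [PySem.List.mem_pyRange_one]; omega
    · show 3 ≤ (pvPts n d.1 d.2 b1 b2).length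
      unfold pvPts
      rw [← hfull]
      exact h3
    · show pvFull n d.1 d.2 x0 y0 = pvPts n d.1 d.2 b1 b2
      unfold pvPts
      exact hfull
  · rintro ⟨rdx, hrdx, rdy, hrdy, hg1, hg2, x0, hx0, y0, hy0, hnb, h3, rfl⟩
    rw [PySem.List.mem_pyRange_one] at hrdx hrdy hx0 hy0
    have hOK : pvDirOK n rdx rdy := ⟨hrdx.1, hrdx.2, hrdy.1, hrdy.2, hg1, hg2⟩
    have hc := pvDirOK_canon n rdx rdy hOK
    have hfull : pvFull n rdx rdy x0 y0 = pvPts n rdx rdy x0 y0 := by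
      unfold pvFull
      rw [pvBack_out n rdx rdy _ _ _ hnb, List.reverse_nil, List.nil_append]
      exact pvSorted_fwd n rdx rdy hc _ x0 y0
    refine ⟨(rdx, rdy), (pvDirs_iff n (rdx, rdy)).mpr hOK, x0, ?_, y0, ?_, ?_, ?_⟩
    · rw [PySem.List.mem_pyRange_one]; omega
    · rw [PySem.List.mem_pyRange_one]; omega
    · rw [hfull]; exact h3
    · exact hfull.symm

-- ===== VERDICT (by name: the statement is the Claim_ definition above) =====
theorem all_lines_py_spec : Claim_equal_all_lines_py := by
  intro n _
  unfold Spec_all_lines_py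
  rw [pvA_eq, pvB_eq]
  have hinst : (fun (a b : List (Lex (Int × Int))) => List.decidableLT a b)
      = (LinearOrder.toDecidableLT : DecidableLT (List (Lex (Int × Int)))) := by
    funext a b; exact Subsingleton.elim _ _
  rw [hinst]
  exact PySem.List.sorted_eq_sorted_of_perm _ _ pvKl
    (List.map_injective_iff.mpr (fun a b hab => by simpa [pvKp] using hab))
    ((List.perm_ext_iff_of_nodup (pvNodupA n) (pvNodupB n)).mpr (pvMemIff n))
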